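-- pv_equiv track=rewrite | github.com/naoya25/atcoder | ABC/407/e.py | calc
-- ===== SOURCE A (Python) =====
-- import heapq
--
-- def calc(n, a):
--     total = sum(a)
--     removed_sum = 0
--     heap = []
--
--     for i, val in enumerate(a, 1):
--         heapq.heappush(heap, -val)
--         removed_sum += val
--
--         if len(heap) > (i // 2):
--             largest = -heapq.heappop(heap)
--             removed_sum -= largest
--
--     return total - removed_sum
-- ===== SOURCE B (Python) =====
-- def calc(n, a):
--     # Round-based selection without a heap: the first element is always taken;
--     # then the remaining elements are consumed two at a time, each pair joins a
--     # candidate pool and the pool's maximum is selected (and removed) per round.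
--     if not a:
--         return 0
--     ans = a[0]
--     pool = []
--     rest = a[1:]
--     while len(rest) >= 2:
--         x, y, rest = rest[0], rest[1], rest[2:]
--         pool.append(x)
--         pool.append(y)
--         m = max(pool)
--         ans += m
--         pool.remove(m)
--     return ans
-- ===== Notes on version B (the rewrite author's own statement) =====
-- stated objective: alternative
-- what changed: B drops the heap and the subtractive total/removed_sum bookkeeping entirely: it always takes the first element, then consumes the rest two at a time, each pair joining a plain candidate pool from which the round's maximum is selected via max()/remove() and added to a direct accumulator.
import Mathlib
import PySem

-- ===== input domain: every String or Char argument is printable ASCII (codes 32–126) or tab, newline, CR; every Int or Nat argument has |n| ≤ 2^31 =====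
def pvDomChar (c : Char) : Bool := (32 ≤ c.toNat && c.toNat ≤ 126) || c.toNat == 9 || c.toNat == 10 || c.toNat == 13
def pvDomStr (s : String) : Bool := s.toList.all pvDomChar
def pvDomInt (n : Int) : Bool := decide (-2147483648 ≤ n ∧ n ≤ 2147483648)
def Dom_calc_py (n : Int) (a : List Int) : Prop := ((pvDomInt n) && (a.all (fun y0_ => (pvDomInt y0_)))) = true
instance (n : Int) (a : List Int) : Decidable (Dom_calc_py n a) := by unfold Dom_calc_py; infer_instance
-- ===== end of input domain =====

-- B replaces A's heap and subtractive total/removed_sum bookkeeping by a heap-free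
-- round-based selection: take the first element, then per pair of remaining elements select
-- the maximum of a plain candidate pool and accumulate directly (objective: alternative).

-- ===== PORT A =====
-- heapq model: calc observes its heap only through len(heap) and the value returned by
-- heappop; heapq.heappush adds the item (length + 1) and heapq.heappop returns the
-- smallest stored value (length - 1), so this port is exact for those observables.
def pvHeappush (heap : List Int) (item : Int) : List Int := heap ++ [item]

def pvHeappop (heap : List Int) : Int × List Int :=
  let m := (PySem.List.min? heap (fun z => z)).getD 0  -- calc only pops a non-empty heap
  (m, heap.erase m)

-- A's for-loop over enumerate(a, 1) with state (heap, removed_sum)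
def calcGo (l : List Int) (i : Int) (heap : List Int) (removedSum : Int) : Int :=
  match l with
  | [] => removedSum
  | v :: tl =>
    let heap1 := pvHeappush heap (-v)
    let rs1 := removedSum + v
    if (heap1.length : Int) > PySem.Int.floordiv i 2 then
      let p := pvHeappop heap1
      calcGo tl (i + 1) p.2 (rs1 - (-p.1))
    else
      calcGo tl (i + 1) heap1 rs1

def calc_py (n : Int) (a : List Int) : Int :=
  a.sum - calcGo a 1 [] 0

-- ===== PORT B =====
-- B's while-loop: per round append the pair to the pool, select and remove its maximum
def calcAltGo (rest : List Int) (pool : List Int) (ans : Int) : Int :=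
  match rest with
  | x :: y :: tl =>
    let pool1 := pool ++ [x] ++ [y]
    let m := (PySem.List.max? pool1 (fun z => z)).getD 0   -- pool1 is never empty
    let ans1 := ans + m
    calcAltGo tl ((PySem.List.remove? pool1 m).getD pool1) ans1  -- m ∈ pool1: remove? succeeds
  | _ => ans

def calc_py_alt (n : Int) (a : List Int) : Int :=
  match a with
  | [] => 0
  | a0 :: rest => calcAltGo rest [] a0

-- ===== PRECONDITION & SPEC =====
def Spec_calc_py (n : Int) (a : List Int) (out : Int) : Prop := out = calc_py_alt n a
instance (n : Int) (a : List Int) (out : Int) : Decidable (Spec_calc_py n a out) := by unfold Spec_calc_py; infer_instance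

-- ===== CLAIM (what is proved, stated in full; the proofs are below) =====
def Claim_equal_calc_py : Prop := ∀ (n : Int) (a : List Int), Dom_calc_py n a → Spec_calc_py n a (calc_py n a)

-- ===== LEMMAS AND PROOFS =====
theorem foldl_min_map_neg : ∀ (t : List Int) (x : Int),
    (t.map (fun z => -z)).foldl min (-x) = -(t.foldl max x) := by
  intro t
  induction t with
  | nil => intro x; simp
  | cons a t ih =>
    intro x
    simp only [List.map_cons, List.foldl_cons, min_neg_neg]
    exact ih (max x a)

theorem min?_map_neg (l : List Int) :
    PySem.List.min? (l.map (fun z => -z)) (fun z => z) =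
      (PySem.List.max? l (fun z => z)).map (fun z => -z) := by
  cases l with
  | nil => rfl
  | cons x t =>
    simp only [List.map_cons, PySem.List.min?_id_cons, PySem.List.max?_id_cons, Option.map_some]
    exact congrArg some (foldl_min_map_neg t x)

theorem erase_map_neg (l : List Int) (v : Int) :
    (l.map (fun z => -z)).erase (-v) = (l.erase v).map (fun z => -z) := by
  have hinj : Function.Injective (fun z : Int => -z) := fun a b h => by
    simpa using congrArg Neg.neg h
  exact (List.map_erase hinj l).symm

-- the coupling: A's heap is B's pool negated elementwise; per pair, the value A pops is
-- the maximum B selects, so only length/index arithmetic and the two accumulators remain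
theorem calc_main_aux :
    ∀ (l pool : List Int) (rs ans : Int),
      calcGo l (2 * (pool.length : Int) + 2) (pool.map (fun z => -z)) rs + calcAltGo l pool ans
        = rs + ans + l.sum
  | [], pool, rs, ans => by simp [calcGo, calcAltGo]
  | [x], pool, rs, ans => by
    have hno : ¬ ((((pool.map (fun z => -z)) ++ [-x]).length : Int) >
        PySem.Int.floordiv (2 * (pool.length : Int) + 2) 2) := by
      rw [PySem.Int.floordiv_eq_ediv_of_pos (by norm_num)]
      simp only [List.length_append, List.length_map, List.length_cons, List.length_nil]
      omega
    simp only [calcGo, calcAltGo, pvHeappush, if_neg hno, List.sum_cons, List.sum_nil]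
    ring
  | x :: y :: tl, pool, rs, ans => by
    have hno : ¬ ((((pool.map (fun z => -z)) ++ [-x]).length : Int) >
        PySem.Int.floordiv (2 * (pool.length : Int) + 2) 2) := by
      rw [PySem.Int.floordiv_eq_ediv_of_pos (by norm_num)]
      simp only [List.length_append, List.length_map, List.length_cons, List.length_nil]
      omega
    have hyes : (((((pool.map (fun z => -z)) ++ [-x]) ++ [-y]).length : Int) >
        PySem.Int.floordiv (2 * (pool.length : Int) + 2 + 1) 2) := by
      rw [PySem.Int.floordiv_eq_ediv_of_pos (by norm_num)]
      simp only [List.length_append, List.length_map, List.length_cons, List.length_nil]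
      omega
    obtain ⟨mv, hmv⟩ : ∃ mv, PySem.List.max? (pool ++ [x] ++ [y]) (fun z => z) = some mv := by
      rcases hmax : PySem.List.max? (pool ++ [x] ++ [y]) (fun z => z) with _ | mv
      · exact absurd ((PySem.List.max?_eq_none_iff _ _).mp hmax) (by simp)
      · exact ⟨mv, rfl⟩
    have hmem : mv ∈ pool ++ [x] ++ [y] := PySem.List.max?_mem hmv
    have hmin : PySem.List.min? (((pool.map (fun z => -z)) ++ [-x]) ++ [-y]) (fun z => z)
        = some (-mv) := by
      rw [show ((pool.map (fun z => -z)) ++ [-x]) ++ [-y]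
            = (pool ++ [x] ++ [y]).map (fun z => -z) from by simp,
          min?_map_neg, hmv]
      rfl
    have herase : (((pool.map (fun z => -z)) ++ [-x]) ++ [-y]).erase (-mv)
        = ((pool ++ [x] ++ [y]).erase mv).map (fun z => -z) := by
      rw [show ((pool.map (fun z => -z)) ++ [-x]) ++ [-y]
            = (pool ++ [x] ++ [y]).map (fun z => -z) from by simp]
      exact erase_map_neg _ _
    have hrem : PySem.List.remove? (pool ++ [x] ++ [y]) mv
        = some ((pool ++ [x] ++ [y]).erase mv) := PySem.List.remove?_eq_some_erase _ mv hmem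
    have hlen : (((pool ++ [x] ++ [y]).erase mv).length : Int) = (pool.length : Int) + 1 := by
      have := List.length_erase_of_mem hmem
      simp only [List.length_append, List.length_cons, List.length_nil] at this
      omega
    have ih := calc_main_aux tl ((pool ++ [x] ++ [y]).erase mv)
      (rs + x + y - mv) (ans + mv)
    rw [hlen] at ih
    simp only [calcGo, calcAltGo, pvHeappush, pvHeappop, if_neg hno, if_pos hyes,
      hmv, hmin, hrem, Option.getD_some, herase, List.sum_cons]
    rw [show 2 * (pool.length : Int) + 2 + 1 + 1 = 2 * ((pool.length : Int) + 1) + 2 from by ring]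
    rw [show rs + x + y - - -mv = rs + x + y - mv from by ring]
    linarith [ih]

-- ===== VERDICT (by name: the statement is the Claim_ definition above) =====
theorem calc_py_spec : Claim_equal_calc_py := by
  intro n a _
  unfold Spec_calc_py calc_py calc_py_alt
  cases a with
  | nil => rfl
  | cons a0 rest =>
    have h1 : calcGo (a0 :: rest) 1 [] 0 = calcGo rest 2 [] 0 := by
      simp [calcGo, pvHeappush, pvHeappop, PySem.Int.floordiv, PySem.List.min?_id_cons]
    have h2 := calc_main_aux rest [] 0 a0
    simp only [List.length_nil, Nat.cast_zero, List.map_nil] at h2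
    norm_num at h2
    rw [h1]
    simp only [List.sum_cons]
    omega
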